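-- pv_equiv track=rewrite | github.com/selgiel/TMA01 | app.py | get_first_last_paragraph
-- ===== SOURCE A (Python) =====
-- def get_first_last_paragraph(description):
--     paragraphs = [p for p in description if p]
--     if len(paragraphs) >= 2:
--         return paragraphs[0], paragraphs[-1]
--     elif paragraphs:
--         return paragraphs[0], ''
--     else:
--         return '', ''
-- ===== SOURCE B (Python) =====
-- def get_first_last_paragraph(description):
--     # Scan from the front for the first non-empty paragraph; then scan the
--     # remainder from the back for the last non-empty one. No filtered list.
--     first = None
--     rest = []
--     for k, p in enumerate(description):
--         if p:
--             first = p
--             rest = description[k + 1:]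
--             break
--     if first is None:
--         return '', ''
--     last = ''
--     for p in reversed(rest):
--         if p:
--             last = p
--             break
--     return first, last
-- ===== Notes on version B (the rewrite author's own statement) =====
-- stated objective: alternative
-- what changed: Replaces the build-a-filtered-list-then-slice strategy by two directed early-exit scans: one forward scan finds the first non-empty paragraph, one backward scan over the tail after it finds the last; no intermediate list of all non-empty paragraphs is built.
import Mathlib
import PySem

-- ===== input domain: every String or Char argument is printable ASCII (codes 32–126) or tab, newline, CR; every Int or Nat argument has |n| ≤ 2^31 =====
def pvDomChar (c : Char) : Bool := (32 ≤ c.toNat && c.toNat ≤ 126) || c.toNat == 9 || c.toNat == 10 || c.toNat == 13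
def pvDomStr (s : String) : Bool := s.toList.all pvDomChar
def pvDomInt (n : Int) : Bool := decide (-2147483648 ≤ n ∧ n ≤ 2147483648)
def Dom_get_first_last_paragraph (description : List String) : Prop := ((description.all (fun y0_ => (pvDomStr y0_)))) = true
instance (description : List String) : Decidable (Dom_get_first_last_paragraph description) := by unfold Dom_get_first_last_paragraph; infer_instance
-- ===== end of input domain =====

-- B replaces the filter-then-slice with two directed early-exit scans (return value only; same results).
-- ===== PORT A =====
-- paragraphs = [p for p in description if p]; indexing paragraphs[0]/paragraphs[-1] is
-- guarded by the length tests, so headD/getLastD with an unused default is exact here.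
def get_first_last_paragraph (description : List String) : String × String :=
  let paragraphs := description.filter (fun p => p != "")
  if 2 ≤ paragraphs.length then (paragraphs.headD "", paragraphs.getLastD "")
  else if paragraphs ≠ [] then (paragraphs.headD "", "")
  else ("", "")

-- ===== PORT B =====
-- forward scan: first non-empty paragraph together with the tail after it (Source B's first loop)
def pvFirstSplit : List String → Option (String × List String)
  | [] => none
  | p :: rest => if p != "" then some (p, rest) else pvFirstSplit rest

-- backward scan: first non-empty element of the reversed list (Source B's second loop)
def pvBackScan : List String → String
  | [] => ""
  | p :: rest => if p != "" then p else pvBackScan rest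

def get_first_last_paragraph_alt (description : List String) : String × String :=
  match pvFirstSplit description with
  | none => ("", "")
  | some (first, rest) => (first, pvBackScan rest.reverse)

-- ===== PRECONDITION & SPEC =====
def Spec_get_first_last_paragraph (description : List String) (out : String × String) : Prop := out = get_first_last_paragraph_alt description
instance (description : List String) (out : String × String) : Decidable (Spec_get_first_last_paragraph description out) := by unfold Spec_get_first_last_paragraph; infer_instance

-- ===== CLAIM (what is proved, stated in full; the proofs are below) =====
def Claim_equal_get_first_last_paragraph : Prop := ∀ (description : List String), Dom_get_first_last_paragraph description → Spec_get_first_last_paragraph description (get_first_last_paragraph description)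

-- ===== LEMMAS AND PROOFS =====

theorem pvFirstSplit_none {l : List String} (h : pvFirstSplit l = none) :
    l.filter (fun p => p != "") = [] := by
  induction l with
  | nil => rfl
  | cons p rest ih =>
    simp only [pvFirstSplit] at h
    by_cases hp : p != ""
    · simp [hp] at h
    · simp only [hp] at h
      simp [hp, ih h]

theorem pvFirstSplit_some {l : List String} {f : String} {r : List String}
    (h : pvFirstSplit l = some (f, r)) :
    l.filter (fun p => p != "") = f :: r.filter (fun p => p != "") := by
  induction l with
  | nil => simp [pvFirstSplit] at h
  | cons p rest ih =>
    simp only [pvFirstSplit] at h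
    by_cases hp : p != ""
    · simp only [hp, if_pos, Option.some.injEq, Prod.mk.injEq] at h
      obtain ⟨rfl, rfl⟩ := h
      simp [hp]
    · simp only [hp] at h
      simp [hp, ih h]

theorem pvBackScan_eq (l : List String) :
    pvBackScan l = (l.filter (fun p => p != "")).headD "" := by
  induction l with
  | nil => rfl
  | cons p rest ih =>
    by_cases hp : p != "" <;> simp [pvBackScan, hp, ih]

theorem pvBackScan_reverse (l : List String) :
    pvBackScan l.reverse = (l.filter (fun p => p != "")).getLastD "" := by
  rw [pvBackScan_eq, List.filter_reverse, List.headD_eq_head?_getD,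
    List.head?_reverse, List.getLastD_eq_getLast?]

-- ===== VERDICT (by name: the statement is the Claim_ definition above) =====
theorem get_first_last_paragraph_spec : Claim_equal_get_first_last_paragraph := by
  intro description _
  unfold Spec_get_first_last_paragraph get_first_last_paragraph get_first_last_paragraph_alt
  cases h : pvFirstSplit description with
  | none =>
    simp [pvFirstSplit_none h]
  | some fr =>
    obtain ⟨f, r⟩ := fr
    have hf := pvFirstSplit_some h
    simp only [pvBackScan_reverse]
    cases hr : r.filter (fun p => p != "") with
    | nil => simp [hf, hr]
    | cons b t =>
      simp only [hf, hr]
      have hlen : 2 ≤ (f :: b :: t).length := by simp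
      simp [List.getLastD_eq_getLast?, List.getLast?_cons_cons]
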